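-- pv_equiv track=rewrite | github.com/h920032/IM_project | fixed/tool.py | SetDAY
-- ===== SOURCE A (Python) =====
-- def SetDAY(day, total_day, DATE):   #第一天上班是星期幾/幾天
--     set = {'all':list(range(total_day))}
--     set['Mon']=[]; set['Tue']=[]; set['Wed']=[]
--     set['Thu']=[]; set['Fri']=[]
--     # 所有周一，所有週二，所有週三...
--     w = ['Mon','Tue','Wed','Thu','Fri']
--     for i in range(total_day):
--         set[ w[(DATE[i]-1)%7] ].append(i)
--     return set
-- ===== SOURCE B (Python) =====
-- def SetDAY(day, total_day, DATE):
--     res = {'all': list(range(total_day))}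
--     for k, name in enumerate(['Mon', 'Tue', 'Wed', 'Thu', 'Fri']):
--         res[name] = [i for i in range(total_day) if (DATE[i] - 1) % 7 == k]
--     return res
-- ===== Notes on version B (the rewrite author's own statement) =====
-- stated objective: alternative
-- what changed: B replaces A's single bucketing pass (indexing a 5-name list and appending to the matched dict entry per day) with five filtering comprehensions, one per weekday, comparing the computed weekday number to the bucket index; Pre_ excludes inputs where A raises (day index beyond DATE, or a weekend weekday causing IndexError on the 5-element name list).
import Mathlib
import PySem

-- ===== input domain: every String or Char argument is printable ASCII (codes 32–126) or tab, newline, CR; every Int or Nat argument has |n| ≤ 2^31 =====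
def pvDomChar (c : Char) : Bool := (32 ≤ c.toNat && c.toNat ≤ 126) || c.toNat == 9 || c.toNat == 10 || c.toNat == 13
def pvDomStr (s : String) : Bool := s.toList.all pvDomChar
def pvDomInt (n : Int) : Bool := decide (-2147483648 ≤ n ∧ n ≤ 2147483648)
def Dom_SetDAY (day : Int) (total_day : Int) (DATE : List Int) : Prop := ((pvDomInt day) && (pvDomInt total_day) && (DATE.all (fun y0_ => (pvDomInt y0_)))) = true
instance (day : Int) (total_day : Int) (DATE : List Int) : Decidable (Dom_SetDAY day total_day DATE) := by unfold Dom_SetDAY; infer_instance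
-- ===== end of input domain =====

-- B replaces A's single bucketing pass with five per-weekday filtering passes; equivalence is on the return value, on inputs where A raises no exception.

-- ===== PORT A =====
-- weekday key of day index i: (DATE[i]-1) % 7
def pvKey (DATE : List Int) (i : Int) : Int :=
  PySem.Int.mod (PySem.List.pyGetD DATE i 0 - 1) 7

def SetDAY (day : Int) (total_day : Int) (DATE : List Int) : List (String × List Int) :=
  let s0 : PySem.Dict String (List Int) :=
    (((((PySem.Dict.empty.insert "all" (PySem.List.pyRange 0 total_day 1)).insert
        "Mon" []).insert "Tue" []).insert "Wed" []).insert "Thu" []).insert "Fri" []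
  let w : List String := ["Mon", "Tue", "Wed", "Thu", "Fri"]
  let sFin := (PySem.List.pyRange 0 total_day 1).foldl
    (fun s i => s.modify (PySem.List.pyGetD w (pvKey DATE i) "") [] (fun l => l ++ [i])) s0
  sFin.items

-- ===== PORT B =====
def SetDAY_alt (day : Int) (total_day : Int) (DATE : List Int) : List (String × List Int) :=
  let res0 : PySem.Dict String (List Int) :=
    PySem.Dict.empty.insert "all" (PySem.List.pyRange 0 total_day 1)
  let resFin := (PySem.List.enumerate ["Mon", "Tue", "Wed", "Thu", "Fri"] 0).foldl
    (fun res p =>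
      res.insert p.2 ((PySem.List.pyRange 0 total_day 1).filter (fun i => pvKey DATE i == p.1))) res0
  resFin.items

-- ===== PRECONDITION & SPEC =====
-- Pre_ excludes exactly the inputs where A raises: a day index beyond DATE (IndexError), or a
-- weekend weekday value making (DATE[i]-1)%7 ≥ 5 index past the 5-element name list (IndexError).
def Pre_SetDAY (day : Int) (total_day : Int) (DATE : List Int) : Prop :=
  total_day ≤ (DATE.length : Int) ∧
    ∀ x ∈ DATE.take total_day.toNat, PySem.Int.mod (x - 1) 7 < 5
instance (day : Int) (total_day : Int) (DATE : List Int) : Decidable (Pre_SetDAY day total_day DATE) := by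
  unfold Pre_SetDAY; infer_instance

def pvWitness_SetDAY : Int × Int × List Int := (3, 3, [1, 2, 3])

def Spec_SetDAY (day : Int) (total_day : Int) (DATE : List Int) (out : List (String × List Int)) : Prop := out = SetDAY_alt day total_day DATE
instance (day : Int) (total_day : Int) (DATE : List Int) (out : List (String × List Int)) : Decidable (Spec_SetDAY day total_day DATE out) := by unfold Spec_SetDAY; infer_instance

-- ===== CLAIM (what is proved, stated in full; the proofs are below) =====
def Claim_equal_SetDAY : Prop := ∀ (day : Int) (total_day : Int) (DATE : List Int), Dom_SetDAY day total_day DATE → Pre_SetDAY day total_day DATE → Spec_SetDAY day total_day DATE (SetDAY day total_day DATE)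

-- ===== LEMMAS AND PROOFS =====

theorem SetDAY_step (DATE : List Int) (x : Int) (R a b c d e : List Int)
    (hk : pvKey DATE x = 0 ∨ pvKey DATE x = 1 ∨ pvKey DATE x = 2 ∨
      pvKey DATE x = 3 ∨ pvKey DATE x = 4) :
    (PySem.Dict.mk [("all", R), ("Mon", a), ("Tue", b), ("Wed", c), ("Thu", d), ("Fri", e)]).modify
      (PySem.List.pyGetD ["Mon", "Tue", "Wed", "Thu", "Fri"] (pvKey DATE x) "") []
      (fun l => l ++ [x]) =
    PySem.Dict.mk [("all", R),
      ("Mon", if pvKey DATE x = 0 then a ++ [x] else a),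
      ("Tue", if pvKey DATE x = 1 then b ++ [x] else b),
      ("Wed", if pvKey DATE x = 2 then c ++ [x] else c),
      ("Thu", if pvKey DATE x = 3 then d ++ [x] else d),
      ("Fri", if pvKey DATE x = 4 then e ++ [x] else e)] := by
  rcases hk with hk | hk | hk | hk | hk <;> rw [hk] <;> simp <;> rfl

theorem SetDAY_fold (DATE : List Int) (L : List Int)
    (h : ∀ i ∈ L, 0 ≤ pvKey DATE i ∧ pvKey DATE i < 5)
    (R a b c d e : List Int) :
    L.foldl (fun s i =>
        PySem.Dict.modify s (PySem.List.pyGetD ["Mon","Tue","Wed","Thu","Fri"] (pvKey DATE i) "") []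
          (fun l => l ++ [i]))
      (PySem.Dict.mk [("all", R), ("Mon", a), ("Tue", b), ("Wed", c), ("Thu", d), ("Fri", e)]) =
    PySem.Dict.mk [("all", R),
      ("Mon", a ++ L.filter (fun i => pvKey DATE i == 0)),
      ("Tue", b ++ L.filter (fun i => pvKey DATE i == 1)),
      ("Wed", c ++ L.filter (fun i => pvKey DATE i == 2)),
      ("Thu", d ++ L.filter (fun i => pvKey DATE i == 3)),
      ("Fri", e ++ L.filter (fun i => pvKey DATE i == 4))] := by
  induction L generalizing a b c d e with
  | nil => simp
  | cons x xs ih =>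
    obtain ⟨h0, h5⟩ := h x (by simp)
    have hx : pvKey DATE x = 0 ∨ pvKey DATE x = 1 ∨ pvKey DATE x = 2 ∨
        pvKey DATE x = 3 ∨ pvKey DATE x = 4 := by omega
    have hxs : ∀ i ∈ xs, 0 ≤ pvKey DATE i ∧ pvKey DATE i < 5 :=
      fun i hi => h i (by simp [hi])
    rw [List.foldl_cons, SetDAY_step DATE x R a b c d e hx, ih hxs]
    rcases hx with hk | hk | hk | hk | hk <;> simp [hk]

-- ===== VERDICT (by name: the statement is the Claim_ definition above) =====
theorem SetDAY_spec : Claim_equal_SetDAY := by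
  intro day total_day DATE _ hpre
  unfold Spec_SetDAY SetDAY SetDAY_alt
  dsimp only
  have h : ∀ i ∈ PySem.List.pyRange 0 total_day 1, 0 ≤ pvKey DATE i ∧ pvKey DATE i < 5 := by
    intro i hi
    rw [PySem.List.mem_pyRange_one] at hi
    obtain ⟨hlen, hkey⟩ := hpre
    have hilen : i.toNat < DATE.length := by omega
    refine ⟨PySem.Int.mod_nonneg _ (by norm_num), ?_⟩
    have hmem : DATE[i.toNat] ∈ DATE.take total_day.toNat := by
      have hit : i.toNat < total_day.toNat := by omega
      have : (DATE.take total_day.toNat)[i.toNat]'(by simp; omega) = DATE[i.toNat] :=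
        List.getElem_take
      exact this ▸ List.getElem_mem _
    have := hkey _ hmem
    unfold pvKey
    rwa [PySem.List.pyGetD_eq_getElem (xs := DATE) (i := i) (d := 0) (by omega) (by omega)]
  rw [show (((((PySem.Dict.empty.insert "all" (PySem.List.pyRange 0 total_day 1)).insert
        "Mon" ([] : List Int)).insert "Tue" []).insert "Wed" []).insert "Thu" []).insert "Fri" [] =
      PySem.Dict.mk [("all", PySem.List.pyRange 0 total_day 1), ("Mon", []), ("Tue", []),
        ("Wed", []), ("Thu", []), ("Fri", [])] from rfl]
  rw [SetDAY_fold DATE _ h]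
  rfl
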